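-- pv_equiv track=rewrite | github.com/vjsliogeris/hackathon_22_EV | 9_bayes/main_statistical_propability.py | trim_predictions
-- ===== SOURCE A (Python) =====
-- def trim_predictions(predictions: list):
--   lens = {}
--   for p in predictions:
--     p_len = len(p)
--     if p_len in lens.keys():
--       lens[p_len]+=1
--     else:
--       lens[p_len] = 1
--   max_len = max(lens.items())[0]
--   predictions = [p for p in predictions if len(p) == max_len]
--   return predictions, max_len
-- ===== SOURCE B (Python) =====
-- def trim_predictions(predictions: list):
--   kept = []
--   max_len = -1
--   for p in predictions:
--     p_len = len(p)
--     if p_len > max_len: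
--       kept = [p]
--       max_len = p_len
--     elif p_len == max_len:
--       kept.append(p)
--   return kept, max_len
-- ===== Notes on version B (the rewrite author's own statement) =====
-- stated objective: faster
-- what changed: Replaces A's staged pipeline (build a length->count dict, take max over its items, then re-scan to filter) with a single online pass that maintains the current best length and the list of predictions of that length, resetting on a new maximum and appending on a tie; one traversal and no dict removes hashing and the extra passes (measured ~2x at the largest size).
import Mathlib
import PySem

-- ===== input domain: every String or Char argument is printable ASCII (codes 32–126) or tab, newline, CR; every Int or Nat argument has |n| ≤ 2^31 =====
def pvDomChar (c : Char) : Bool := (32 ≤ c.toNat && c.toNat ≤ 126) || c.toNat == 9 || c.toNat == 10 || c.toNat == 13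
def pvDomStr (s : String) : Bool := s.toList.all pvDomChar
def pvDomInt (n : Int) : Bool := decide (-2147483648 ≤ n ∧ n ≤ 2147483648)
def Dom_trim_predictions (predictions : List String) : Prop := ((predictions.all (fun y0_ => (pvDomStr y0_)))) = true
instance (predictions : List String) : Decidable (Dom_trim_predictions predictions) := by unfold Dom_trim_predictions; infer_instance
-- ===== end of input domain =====

-- B replaces A's dict-then-max-then-filter pipeline with a single online pass keeping (current best list, best length); a timing run measured B faster at the largest size.


-- ===== PORT A =====
def trim_predictions (predictions : List String) : List String × Int :=
  let lens : PySem.Dict Int Int := predictions.foldl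
    (fun lens p =>
      let p_len : Int := PySem.Str.len p
      if lens.contains p_len then
        lens.modify p_len 0 (· + 1)   -- lens[p_len] += 1 (key present, so no KeyError)
      else
        lens.insert p_len 1) PySem.Dict.empty
  -- max(lens.items()): lexicographic max over (key, value) pairs; ValueError on an empty dict — excluded by Pre_
  match PySem.List.max2? lens.items Prod.fst Prod.snd with
  | none => ([], 0)
  | some m =>
    let max_len : Int := m.1
    (predictions.filter (fun p => PySem.Str.len p == max_len), max_len)

-- ===== PORT B =====
-- single pass: (kept, max_len); a longer prediction resets kept, an equal-length one is appended
def pvBStep (st : List String × Int) (p : String) : List String × Int :=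
  let p_len : Int := PySem.Str.len p
  if st.2 < p_len then ([p], p_len)
  else if p_len == st.2 then (st.1 ++ [p], st.2)
  else st

def trim_predictions_alt (predictions : List String) : List String × Int :=
  predictions.foldl pvBStep ([], -1)

-- ===== PRECONDITION & SPEC =====
-- A raises ValueError (max of an empty dict) on the empty list; Pre_ excludes exactly that input.
def Pre_trim_predictions (predictions : List String) : Prop := predictions ≠ []
instance (predictions : List String) : Decidable (Pre_trim_predictions predictions) := by unfold Pre_trim_predictions; infer_instance
def pvWitness_trim_predictions : List String := ["ab", "c", "de"]

def Spec_trim_predictions (predictions : List String) (out : List String × Int) : Prop := out = trim_predictions_alt predictions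
instance (predictions : List String) (out : List String × Int) : Decidable (Spec_trim_predictions predictions out) := by unfold Spec_trim_predictions; infer_instance

-- ===== CLAIM (what is proved, stated in full; the proofs are below) =====
def Claim_equal_trim_predictions : Prop := ∀ (predictions : List String), Dom_trim_predictions predictions → Pre_trim_predictions predictions → Spec_trim_predictions predictions (trim_predictions predictions)

-- ===== LEMMAS AND PROOFS =====

-- helpers naming the fold steps inside A's max computation, and a plain binary max
def pvF2 : Option (Int × Int) → Int × Int → Option (Int × Int)
  | none, x => some x
  | some m, x =>
    if (decide (m.1 < x.1) || !decide (x.1 < m.1) && decide (m.2 < x.2)) = true then some x else some m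

def pvF1 : Option Int → Int → Option Int
  | none, x => some x
  | some m, x => if m < x then some x else some m

def pvMM (a b : Int) : Int := if a < b then b else a

-- A's populate loop is Counter(lengths): both branches are 'modify p_len 0 (+1)'.
lemma lens_eq_counter (predictions : List String) :
    predictions.foldl
      (fun lens p =>
        let p_len : Int := PySem.Str.len p
        if lens.contains p_len then lens.modify p_len 0 (· + 1)
        else lens.insert p_len 1) PySem.Dict.empty
    = PySem.Dict.counter (predictions.map (fun p => PySem.Str.len p)) := by
  rw [PySem.Dict.counter_eq_foldl, List.foldl_map]
  congr 1
  funext d p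
  show (if d.contains (PySem.Str.len p) then d.modify (PySem.Str.len p) 0 (· + 1)
        else d.insert (PySem.Str.len p) 1) = d.modify (PySem.Str.len p) 0 (· + 1)
  by_cases h : d.contains (PySem.Str.len p) = true
  · rw [if_pos h]
  · rw [if_neg h]
    have h0 : d.getD (PySem.Str.len p) 0 = 0 :=
      PySem.Dict.getD_of_not_contains d 0 (by simpa using h)
    show d.insert (PySem.Str.len p) 1 = d.insert (PySem.Str.len p) (d.getD (PySem.Str.len p) 0 + 1)
    rw [h0]
    norm_num

lemma pvStep (f : Int → Int) (m x : Int) :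
    pvF2 (Option.map (fun k => (k, f k)) (some m)) ((fun k => (k, f k)) x)
      = Option.map (fun k => (k, f k)) (pvF1 (some m) x) := by
  by_cases h1 : m < x
  · simp [pvF2, pvF1, h1]
  · by_cases h2 : x < m
    · simp [pvF2, pvF1, h1, h2]
    · have hxm : x = m := le_antisymm (not_lt.mp h1) (not_lt.mp h2)
      subst hxm
      simp [pvF2, pvF1]

lemma foldl_pair_aux (f : Int → Int) (t : List Int) : ∀ (acc : Option Int),
    List.foldl pvF2 (acc.map (fun k => (k, f k))) (t.map (fun k => (k, f k)))
      = (List.foldl pvF1 acc t).map (fun k => (k, f k)) := by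
  induction t with
  | nil => intro acc; rfl
  | cons x t ih =>
    intro acc
    rw [List.map_cons, List.foldl_cons, List.foldl_cons]
    cases acc with
    | none => exact ih (some x)
    | some m =>
      rw [pvStep f m x]
      exact ih (pvF1 (some m) x)

-- lexicographic max over pairs (k, f k) is the max of the keys, paired with its f-value
lemma max2?_map_pair (xs : List Int) (f : Int → Int) :
    PySem.List.max2? (xs.map (fun k => (k, f k))) Prod.fst Prod.snd
      = (PySem.List.max? xs (fun x => x)).map (fun k => (k, f k)) := by
  unfold PySem.List.max2? PySem.List.max?
  convert foldl_pair_aux f xs none using 2 <;>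
    first
      | rfl
      | (congr 1; funext acc x; cases acc <;> rfl)

-- max over the deduplicated list equals max over the list
lemma max?_ofList (ls : List Int) :
    PySem.List.max? (PySem.Set.ofList ls) (fun x => x) = PySem.List.max? ls (fun x => x) := by
  cases h1 : PySem.List.max? ls (fun x => x) with
  | none =>
    have : ls = [] := (PySem.List.max?_eq_none_iff ls _).mp h1
    subst this; rfl
  | some m =>
    have hm : m ∈ ls := PySem.List.max?_mem h1
    cases h2 : PySem.List.max? (PySem.Set.ofList ls) (fun x => x) with
    | none =>
      have : PySem.Set.ofList ls = [] := (PySem.List.max?_eq_none_iff _ _).mp h2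
      rw [← PySem.Set.mem_ofList ls m, this] at hm
      cases hm
    | some m' =>
      have hm' : m' ∈ ls := (PySem.Set.mem_ofList ls m').mp (PySem.List.max?_mem h2)
      have h12 : m' ≤ m := PySem.List.max?_isMax h1 m' hm'
      have h21 : m ≤ m' := PySem.List.max?_isMax h2 m ((PySem.Set.mem_ofList ls m).mpr hm)
      rw [le_antisymm h12 h21]

-- running max fold of B, on strings
def pvMF (m : Int) (xs : List String) : Int :=
  xs.foldl (fun a p => pvMM a (PySem.Str.len p)) m

lemma pvMM_le (a b : Int) : a ≤ pvMM a b := by unfold pvMM; split_ifs <;> omega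

lemma le_pvMF (m : Int) (xs : List String) : m ≤ pvMF m xs := by
  induction xs generalizing m with
  | nil => simp [pvMF]
  | cons p xs ih =>
    calc m ≤ pvMM m (PySem.Str.len p) := pvMM_le _ _
    _ ≤ pvMF (pvMM m (PySem.Str.len p)) xs := ih _

-- B's step, written with propositional ifs
lemma pvBStep_eq (st : List String × Int) (p : String) :
    pvBStep st p =
      if st.2 < PySem.Str.len p then ([p], PySem.Str.len p)
      else if PySem.Str.len p = st.2 then (st.1 ++ [p], st.2)
      else st := by
  show (if st.2 < PySem.Str.len p then ([p], PySem.Str.len p)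
        else if PySem.Str.len p == st.2 then (st.1 ++ [p], st.2) else st) = _
  by_cases h1 : st.2 < PySem.Str.len p
  · rw [if_pos h1, if_pos h1]
  · rw [if_neg h1, if_neg h1]
    by_cases h2 : PySem.Str.len p = st.2
    · rw [if_pos (beq_iff_eq.mpr h2), if_pos h2]
    · rw [if_neg (fun hb => h2 (beq_iff_eq.mp hb)), if_neg h2]

-- the single-pass invariant: B's fold from any state is the filter at the running max
lemma bstep_inv (xs : List String) : ∀ (ys : List String) (m : Int),
    List.foldl pvBStep (ys, m) xs
      = ((if pvMF m xs = m then ys else []) ++ xs.filter (fun p => PySem.Str.len p == pvMF m xs),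
         pvMF m xs) := by
  induction xs with
  | nil => intro ys m; simp [pvMF]
  | cons p xs ih =>
    intro ys m
    have hMF : pvMF m (p :: xs) = pvMF (pvMM m (PySem.Str.len p)) xs := rfl
    rw [List.foldl_cons, pvBStep_eq, hMF, List.filter_cons]
    simp only [beq_iff_eq]
    generalize PySem.Str.len p = l
    by_cases h1 : m < l
    · rw [if_pos h1]
      have hmm : pvMM m l = l := by unfold pvMM; rw [if_pos h1]
      rw [hmm, ih [p] l]
      have hge : l ≤ pvMF l xs := le_pvMF _ _
      have hne : pvMF l xs ≠ m := by omega
      rw [if_neg hne]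
      by_cases h2 : l = pvMF l xs
      · rw [if_pos h2.symm, if_pos h2]; simp
      · rw [if_neg (fun h => h2 h.symm), if_neg h2]
    · rw [if_neg h1]
      have hmm : pvMM m l = m := by unfold pvMM; rw [if_neg h1]
      rw [hmm]
      by_cases h2 : l = m
      · rw [if_pos h2, ih (ys ++ [p]) m]
        by_cases h3 : pvMF m xs = m
        · rw [if_pos h3, if_pos h3, if_pos (by omega : l = pvMF m xs)]; simp
        · rw [if_neg h3, if_neg h3, if_neg (by omega : ¬ l = pvMF m xs)]
      · rw [if_neg h2, ih ys m]
        have hge : m ≤ pvMF m xs := le_pvMF _ _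
        rw [if_neg (by omega : ¬ l = pvMF m xs)]

-- A's max? over the lengths equals B's running max started at -1 (lengths are ≥ 0)
lemma foldl_pvF1_some (ls : List Int) : ∀ a : Int,
    List.foldl pvF1 (some a) ls = some (ls.foldl pvMM a) := by
  induction ls with
  | nil => intro a; rfl
  | cons x ls ih =>
    intro a
    have hx : pvF1 (some a) x = some (pvMM a x) := by
      show (if a < x then some x else some a) = some (if a < x then x else a)
      split_ifs <;> rfl
    rw [List.foldl_cons, List.foldl_cons, hx, ih]

lemma max?_eq_pvMF (p : String) (xs : List String) :
    PySem.List.max? ((p :: xs).map (fun q => PySem.Str.len q)) (fun x => x)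
      = some (pvMF (-1) (p :: xs)) := by
  have h1 : PySem.List.max? ((p :: xs).map (fun q => PySem.Str.len q)) (fun x => x)
      = List.foldl pvF1 none ((p :: xs).map (fun q => PySem.Str.len q)) := by
    unfold PySem.List.max?
    congr 1
    funext acc x
    cases acc <;> rfl
  rw [h1, List.map_cons, List.foldl_cons]
  have h2 : pvF1 none (PySem.Str.len p) = some (PySem.Str.len p) := rfl
  rw [h2, foldl_pvF1_some]
  have h0 : (0 : Int) ≤ PySem.Str.len p := by simp [PySem.Str.len]
  have hmm : pvMM (-1) (PySem.Str.len p) = PySem.Str.len p := by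
    unfold pvMM; rw [if_pos (by omega)]
  have hMF : pvMF (-1) (p :: xs) = pvMF (PySem.Str.len p) xs := by
    show pvMF (pvMM (-1) (PySem.Str.len p)) xs = _
    rw [hmm]
  rw [hMF]
  unfold pvMF
  rw [List.foldl_map]

-- ===== VERDICT (by name: the statement is the Claim_ definition above) =====
theorem trim_predictions_spec : Claim_equal_trim_predictions := by
  intro predictions _ hpre
  obtain ⟨p, xs, rfl⟩ : ∃ p xs, predictions = p :: xs := by
    cases predictions with
    | nil => exact absurd rfl hpre
    | cons p xs => exact ⟨p, xs, rfl⟩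
  unfold Spec_trim_predictions trim_predictions trim_predictions_alt
  simp only [lens_eq_counter, PySem.Dict.items_counter, max2?_map_pair, max?_ofList,
    max?_eq_pvMF p xs, Option.map_some]
  rw [bstep_inv (p :: xs) [] (-1)]
  simp
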